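-- pv_equiv track=rewrite | github.com/sahitya-koritala/Multi-Dimensional-Academic-Intelligence-System | main.py | student_category
-- ===== SOURCE A (Python) =====
-- def student_category(data):
--     result = {
--         "At Risk": [],
--         "Average": [],
--         "Good": [],
--         "Top Performer": []
--     }
--
--     for s in data:
--         sid, m, att, assign, perf = s
--
--         if m < 40 or att < 50:
--             result["At Risk"].append(sid)
--         elif 40 <= m <= 70:
--             result["Average"].append(sid)
--         elif 71 <= m <= 90:
--             result["Good"].append(sid)
--         elif m > 90 and att > 80:
--             result["Top Performer"].append(sid)
--
--     return result
-- ===== SOURCE B (Python) =====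
-- def student_category(data):
--     return {
--         "At Risk": [s[0] for s in data if s[1] < 40 or s[2] < 50],
--         "Average": [s[0] for s in data if s[2] >= 50 and 40 <= s[1] <= 70],
--         "Good": [s[0] for s in data if s[2] >= 50 and 71 <= s[1] <= 90],
--         "Top Performer": [s[0] for s in data if s[1] > 90 and s[2] > 80],
--     }
-- ===== Notes on version B (the rewrite author's own statement) =====
-- stated objective: simpler
-- what changed: Replaces the single elif fall-through loop appending into a pre-built dict by four independent self-contained list comprehensions, one per bucket, with mutually exclusive predicates.
import Mathlib
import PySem

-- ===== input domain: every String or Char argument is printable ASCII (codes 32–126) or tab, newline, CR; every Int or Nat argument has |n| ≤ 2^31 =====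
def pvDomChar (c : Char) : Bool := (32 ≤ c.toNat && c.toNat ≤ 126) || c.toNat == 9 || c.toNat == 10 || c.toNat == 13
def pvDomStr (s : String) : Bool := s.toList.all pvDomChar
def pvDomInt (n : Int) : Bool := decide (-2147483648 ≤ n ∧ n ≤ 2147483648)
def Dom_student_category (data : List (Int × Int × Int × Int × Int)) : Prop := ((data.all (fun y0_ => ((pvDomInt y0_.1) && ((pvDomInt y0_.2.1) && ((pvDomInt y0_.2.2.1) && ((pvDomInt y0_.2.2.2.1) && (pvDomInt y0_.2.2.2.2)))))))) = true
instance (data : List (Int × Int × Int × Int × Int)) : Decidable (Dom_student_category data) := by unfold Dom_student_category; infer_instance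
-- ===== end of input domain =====

-- B: the elif fall-through loop is replaced by four independent comprehensions with mutually exclusive predicates (objective: simpler).

-- ===== PORT A =====
-- A's dict has four fixed literal keys; its state is ported as the four bucket lists,
-- each `append` to result[key] becoming an append to the corresponding list, and the
-- dict (insertion-order association list) is assembled at the return.
def student_category (data : List (Int × Int × Int × Int × Int)) : List (String × List Int) :=
  let st := data.foldl
    (fun (r : List Int × List Int × List Int × List Int) s =>
      let (sid, m, att, _assign, _perf) := s
      if m < 40 ∨ att < 50 then (r.1 ++ [sid], r.2.1, r.2.2.1, r.2.2.2)
      else if 40 ≤ m ∧ m ≤ 70 then (r.1, r.2.1 ++ [sid], r.2.2.1, r.2.2.2)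
      else if 71 ≤ m ∧ m ≤ 90 then (r.1, r.2.1, r.2.2.1 ++ [sid], r.2.2.2)
      else if m > 90 ∧ att > 80 then (r.1, r.2.1, r.2.2.1, r.2.2.2 ++ [sid])
      else r)
    ([], [], [], [])
  [("At Risk", st.1), ("Average", st.2.1), ("Good", st.2.2.1), ("Top Performer", st.2.2.2)]

-- ===== PORT B =====
def student_category_alt (data : List (Int × Int × Int × Int × Int)) : List (String × List Int) :=
  [("At Risk", (data.filter (fun s => decide (s.2.1 < 40 ∨ s.2.2.1 < 50))).map (fun s => s.1)),
   ("Average", (data.filter (fun s => decide (s.2.2.1 ≥ 50 ∧ 40 ≤ s.2.1 ∧ s.2.1 ≤ 70))).map (fun s => s.1)),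
   ("Good", (data.filter (fun s => decide (s.2.2.1 ≥ 50 ∧ 71 ≤ s.2.1 ∧ s.2.1 ≤ 90))).map (fun s => s.1)),
   ("Top Performer", (data.filter (fun s => decide (s.2.1 > 90 ∧ s.2.2.1 > 80))).map (fun s => s.1))]

-- ===== PRECONDITION & SPEC =====
def Spec_student_category (data : List (Int × Int × Int × Int × Int)) (out : List (String × List Int)) : Prop := out = student_category_alt data
instance (data : List (Int × Int × Int × Int × Int)) (out : List (String × List Int)) : Decidable (Spec_student_category data out) := by unfold Spec_student_category; infer_instance

-- ===== CLAIM (what is proved, stated in full; the proofs are below) =====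
def Claim_equal_student_category : Prop := ∀ (data : List (Int × Int × Int × Int × Int)), Dom_student_category data → Spec_student_category data (student_category data)

-- ===== LEMMAS AND PROOFS =====

theorem student_category_fold_inv (data : List (Int × Int × Int × Int × Int))
    (a b c d : List Int) :
    data.foldl
      (fun (r : List Int × List Int × List Int × List Int) s =>
        let (sid, m, att, _assign, _perf) := s
        if m < 40 ∨ att < 50 then (r.1 ++ [sid], r.2.1, r.2.2.1, r.2.2.2)
        else if 40 ≤ m ∧ m ≤ 70 then (r.1, r.2.1 ++ [sid], r.2.2.1, r.2.2.2)
        else if 71 ≤ m ∧ m ≤ 90 then (r.1, r.2.1, r.2.2.1 ++ [sid], r.2.2.2)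
        else if m > 90 ∧ att > 80 then (r.1, r.2.1, r.2.2.1, r.2.2.2 ++ [sid])
        else r)
      (a, b, c, d)
    = (a ++ (data.filter (fun s => decide (s.2.1 < 40 ∨ s.2.2.1 < 50))).map (fun s => s.1),
       b ++ (data.filter (fun s => decide (s.2.2.1 ≥ 50 ∧ 40 ≤ s.2.1 ∧ s.2.1 ≤ 70))).map (fun s => s.1),
       c ++ (data.filter (fun s => decide (s.2.2.1 ≥ 50 ∧ 71 ≤ s.2.1 ∧ s.2.1 ≤ 90))).map (fun s => s.1),
       d ++ (data.filter (fun s => decide (s.2.1 > 90 ∧ s.2.2.1 > 80))).map (fun s => s.1)) := by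
  induction data generalizing a b c d with
  | nil => simp
  | cons hd tl ih =>
    obtain ⟨sid, m, att, assign, perf⟩ := hd
    simp only [List.foldl_cons, List.filter_cons]
    by_cases h1 : m < 40 ∨ att < 50
    · have e1 : decide (m < 40 ∨ att < 50) = true := by simp [h1]
      simp only [if_pos h1, e1, ih]
      have e2 : decide (att ≥ 50 ∧ 40 ≤ m ∧ m ≤ 70) = false := by
        simp only [decide_eq_false_iff_not]; omega
      have e3 : decide (att ≥ 50 ∧ 71 ≤ m ∧ m ≤ 90) = false := by
        simp only [decide_eq_false_iff_not]; omega
      have e4 : decide (m > 90 ∧ att > 80) = false := by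
        simp only [decide_eq_false_iff_not]; omega
      simp [e2, e3, e4]
    · have e1 : decide (m < 40 ∨ att < 50) = false := by simp [h1]
      simp only [if_neg h1, e1]
      by_cases h2 : 40 ≤ m ∧ m ≤ 70
      · have e2 : decide (att ≥ 50 ∧ 40 ≤ m ∧ m ≤ 70) = true := by
          simp only [decide_eq_true_iff]; omega
        have e3 : decide (att ≥ 50 ∧ 71 ≤ m ∧ m ≤ 90) = false := by
          simp only [decide_eq_false_iff_not]; omega
        have e4 : decide (m > 90 ∧ att > 80) = false := by
          simp only [decide_eq_false_iff_not]; omega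
        simp only [if_pos h2, ih, e2, e3, e4]
        simp
      · have e2 : decide (att ≥ 50 ∧ 40 ≤ m ∧ m ≤ 70) = false := by
          simp only [decide_eq_false_iff_not]; omega
        simp only [if_neg h2, e2]
        by_cases h3 : 71 ≤ m ∧ m ≤ 90
        · have e3 : decide (att ≥ 50 ∧ 71 ≤ m ∧ m ≤ 90) = true := by
            simp only [decide_eq_true_iff]; omega
          have e4 : decide (m > 90 ∧ att > 80) = false := by
            simp only [decide_eq_false_iff_not]; omega
          simp only [if_pos h3, ih, e3, e4]
          simp
        · have e3 : decide (att ≥ 50 ∧ 71 ≤ m ∧ m ≤ 90) = false := by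
            simp only [decide_eq_false_iff_not]; omega
          simp only [if_neg h3, e3]
          by_cases h4 : m > 90 ∧ att > 80
          · have e4 : decide (m > 90 ∧ att > 80) = true := by
              simp only [decide_eq_true_iff]; omega
            simp only [if_pos h4, ih, e4]
            simp
          · have e4 : decide (m > 90 ∧ att > 80) = false := by
              simp only [decide_eq_false_iff_not]; omega
            simp only [if_neg h4, e4, ih]
            simp

-- ===== VERDICT (by name: the statement is the Claim_ definition above) =====
theorem student_category_spec : Claim_equal_student_category := by
  intro data _
  unfold Spec_student_category student_category student_category_alt
  simp only [student_category_fold_inv data [] [] [] [], List.nil_append]
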